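-- pv_equiv track=rewrite | github.com/SkyTemple/skytemple-files | skytemple_files/common/util.py | _mpcu__check
-- ===== SOURCE A (Python) =====
-- from typing import (
--     TYPE_CHECKING,
--     Any,
--     Callable,
--     Dict,
--     Generator,
--     Iterable,
--     List,
--     Optional,
--     Protocol,
--     Sequence,
--     Tuple,
--     TypeVar,
--     Union,
--     overload,
--     Literal,
-- )
--
-- def _mpcu__check(
--     color: List[int],
--     already_collected_colors: List[List[int]],
--     change_next: int = 0,
--     change_amount: int = 1,
-- ) -> List[int]:
--     if color not in already_collected_colors:
--         return color
--     else:
--         # Try to find a unique color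
--         # Yes I didn't really think all that much when writing this and it doesn't even cover all possibilities.
--         if change_next == 0:
--             # r + 1
--             new_color = [color[0] + change_amount, color[1], color[2]]
--         elif change_next == 1:
--             # g + 1
--             new_color = [color[0] - change_amount, color[1] + change_amount, color[2]]
--         elif change_next == 2:
--             # b + 1
--             new_color = [color[0], color[1] - change_amount, color[2] + change_amount]
--         elif change_next == 3:
--             # gb + 1
--             new_color = [color[0], color[1] + change_amount, color[2]]
--         elif change_next == 4:
--             # rgb + 1
--             new_color = [color[0] + change_amount, color[1], color[2]]
--         elif change_next == 5:
--             # rg + 1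
--             new_color = [color[0], color[1], color[2] - change_amount]
--         elif change_next == 6:
--             # b - 1
--             new_color = [
--                 color[0] - change_amount,
--                 color[1] - change_amount,
--                 color[2] - change_amount,
--             ]
--         elif change_next == 7:
--             # g - 1
--             new_color = [color[0], color[1] - change_amount, color[2] + change_amount]
--         else:
--             # r - 1
--             new_color = [color[0] - change_amount, color[1] + change_amount, color[2]]
--         for i in [0, 1, 2]:
--             if new_color[i] < 0:
--                 new_color[i] = 0
--             elif new_color[i] > 255:
--                 new_color[i] = 255
--         new_change_next = (change_next + 1) % 8
--         if new_change_next == 0: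
--             change_amount += 1
--         return _mpcu__check(
--             new_color, already_collected_colors, new_change_next, change_amount
--         )
-- ===== SOURCE B (Python) =====
-- # B: iterative loop driven by a per-change_next delta table and a clamp comprehension
-- # instead of A's recursive 8-way if/elif chain with an in-place clamp loop.
--
-- _DELTAS = [
--     (1, 0, 0),
--     (-1, 1, 0),
--     (0, -1, 1),
--     (0, 1, 0),
--     (1, 0, 0),
--     (0, 0, -1),
--     (-1, -1, -1),
--     (0, -1, 1),
-- ]
--
--
-- def _mpcu__check(
--     color,
--     already_collected_colors,
--     change_next=0,
--     change_amount=1,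
-- ):
--     current = color
--     while current in already_collected_colors:
--         d = _DELTAS[change_next] if 0 <= change_next < 8 else (-1, 1, 0)
--         current = [
--             min(255, max(0, ch + change_amount * dd)) for ch, dd in zip(current, d)
--         ]
--         change_next = (change_next + 1) % 8
--         if change_next == 0:
--             change_amount += 1
--     return current
-- ===== Notes on version B (the rewrite author's own statement) =====
-- stated objective: simpler
-- what changed: Replaced A's tail recursion with an 8-way if/elif branch chain and an in-place clamp loop by an iterative while loop that looks the per-change_next channel deltas up in a constant table and builds each candidate with a single clamp comprehension.
import Mathlib
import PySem

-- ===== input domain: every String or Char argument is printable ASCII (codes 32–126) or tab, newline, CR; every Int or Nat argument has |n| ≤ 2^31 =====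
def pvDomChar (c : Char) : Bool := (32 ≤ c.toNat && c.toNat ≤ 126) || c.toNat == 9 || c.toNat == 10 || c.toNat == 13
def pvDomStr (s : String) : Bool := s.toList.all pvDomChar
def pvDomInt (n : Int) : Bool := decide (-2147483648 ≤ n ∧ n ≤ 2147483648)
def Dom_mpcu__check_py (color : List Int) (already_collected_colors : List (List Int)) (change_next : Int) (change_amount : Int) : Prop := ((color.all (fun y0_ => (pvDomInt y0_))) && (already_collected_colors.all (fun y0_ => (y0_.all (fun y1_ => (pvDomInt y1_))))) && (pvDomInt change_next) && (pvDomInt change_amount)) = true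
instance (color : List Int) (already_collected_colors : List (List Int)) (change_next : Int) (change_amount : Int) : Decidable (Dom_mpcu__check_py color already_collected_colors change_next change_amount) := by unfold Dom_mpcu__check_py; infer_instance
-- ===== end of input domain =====

-- B replaces A's recursive 8-way if/elif chain (plus in-place clamp loop) by an
-- iterative loop driven by a delta-coefficient table and a clamp comprehension;
-- same return value on Pre_ (no speed claim).

-- ===== PORT A =====
-- A's unbounded recursion is totalized with a fuel counter; both ports use the SAME
-- fuel and the equivalence theorem holds at every fuel, so no input-size bound is
-- smuggled into the claim.
def pvFuel : Nat := 4096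

def mpcu__check_py_go : Nat → List Int → List (List Int) → Int → Int → List Int
  | 0, color, _, _, _ => color
  | Nat.succ fuel, color, already_collected_colors, change_next, change_amount =>
    if color ∉ already_collected_colors then color
    else
      -- color[0], color[1], color[2]: exact under Pre_ (3 ≤ color.length whenever
      -- color ∈ already_collected_colors, so no IndexError branch is reachable)
      let c0 := PySem.List.pyGetD color 0 0
      let c1 := PySem.List.pyGetD color 1 0
      let c2 := PySem.List.pyGetD color 2 0
      let new_color : List Int :=
        if change_next = 0 then [c0 + change_amount, c1, c2]
        else if change_next = 1 then [c0 - change_amount, c1 + change_amount, c2]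
        else if change_next = 2 then [c0, c1 - change_amount, c2 + change_amount]
        else if change_next = 3 then [c0, c1 + change_amount, c2]
        else if change_next = 4 then [c0 + change_amount, c1, c2]
        else if change_next = 5 then [c0, c1, c2 - change_amount]
        else if change_next = 6 then [c0 - change_amount, c1 - change_amount, c2 - change_amount]
        else if change_next = 7 then [c0, c1 - change_amount, c2 + change_amount]
        else [c0 - change_amount, c1 + change_amount, c2]
      -- for i in [0, 1, 2]: clamp new_color[i] in place
      let new_color := List.foldl (fun nc i =>
          if nc.getD i 0 < 0 then nc.set i 0
          else if nc.getD i 0 > 255 then nc.set i 255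
          else nc) new_color [0, 1, 2]
      let new_change_next := PySem.Int.mod (change_next + 1) 8
      let change_amount := if new_change_next = 0 then change_amount + 1 else change_amount
      mpcu__check_py_go fuel new_color already_collected_colors new_change_next change_amount

def mpcu__check_py (color : List Int) (already_collected_colors : List (List Int)) (change_next : Int) (change_amount : Int) : List Int :=
  mpcu__check_py_go pvFuel color already_collected_colors change_next change_amount

-- ===== PORT B =====
def pvDeltas : List (Int × Int × Int) :=
  [(1, 0, 0), (-1, 1, 0), (0, -1, 1), (0, 1, 0), (1, 0, 0), (0, 0, -1), (-1, -1, -1), (0, -1, 1)]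

-- B's while loop, totalized with the same fuel counter
def mpcu__check_py_alt_go : Nat → List Int → List (List Int) → Int → Int → List Int
  | 0, current, _, _, _ => current
  | Nat.succ fuel, current, already_collected_colors, change_next, change_amount =>
    if current ∈ already_collected_colors then
      let d : Int × Int × Int :=
        if 0 ≤ change_next ∧ change_next < 8 then
          (PySem.List.pyGet? pvDeltas change_next).getD (-1, 1, 0)
        else (-1, 1, 0)
      let current := (current.zip [d.1, d.2.1, d.2.2]).map
        (fun p => min 255 (max 0 (p.1 + change_amount * p.2)))
      let change_next := PySem.Int.mod (change_next + 1) 8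
      mpcu__check_py_alt_go fuel current already_collected_colors change_next
        (if change_next = 0 then change_amount + 1 else change_amount)
    else current

def mpcu__check_py_alt (color : List Int) (already_collected_colors : List (List Int)) (change_next : Int) (change_amount : Int) : List Int :=
  mpcu__check_py_alt_go pvFuel color already_collected_colors change_next change_amount

-- ===== PRECONDITION & SPEC =====
-- Pre_ excludes exactly the inputs on which A raises IndexError: a color of fewer
-- than 3 channels that occurs in the collected list (every branch of A reads
-- color[0..2] there).  (On adversarial inputs whose candidate chain exceeds the
-- interpreter's recursion limit A raises RecursionError; that set has no closed
-- form on the input and is not carved out — the ports totalize the recursion with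
-- one shared fuel counter and are proved equal at every fuel.)
def Pre_mpcu__check_py (color : List Int) (already_collected_colors : List (List Int)) (change_next : Int) (change_amount : Int) : Prop :=
  color ∈ already_collected_colors → 3 ≤ color.length
instance (color : List Int) (already_collected_colors : List (List Int)) (change_next : Int) (change_amount : Int) : Decidable (Pre_mpcu__check_py color already_collected_colors change_next change_amount) := by unfold Pre_mpcu__check_py; infer_instance

def pvWitness_mpcu__check_py : List Int × List (List Int) × Int × Int :=
  ([10, 20, 30], [[10, 20, 30], [11, 20, 30]], 0, 1)

def Spec_mpcu__check_py (color : List Int) (already_collected_colors : List (List Int)) (change_next : Int) (change_amount : Int) (out : List Int) : Prop := out = mpcu__check_py_alt color already_collected_colors change_next change_amount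
instance (color : List Int) (already_collected_colors : List (List Int)) (change_next : Int) (change_amount : Int) (out : List Int) : Decidable (Spec_mpcu__check_py color already_collected_colors change_next change_amount out) := by unfold Spec_mpcu__check_py; infer_instance

-- ===== CLAIM (what is proved, stated in full; the proofs are below) =====
def Claim_equal_mpcu__check_py : Prop := ∀ (color : List Int) (already_collected_colors : List (List Int)) (change_next : Int) (change_amount : Int), Dom_mpcu__check_py color already_collected_colors change_next change_amount → Pre_mpcu__check_py color already_collected_colors change_next change_amount → Spec_mpcu__check_py color already_collected_colors change_next change_amount (mpcu__check_py color already_collected_colors change_next change_amount)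


-- ===== LEMMAS AND PROOFS =====

-- A's in-place clamp loop on a 3-element list equals component-wise min/max clamping
theorem pv_clamp3 (x y z : Int) :
    List.foldl (fun nc i =>
        if nc.getD i 0 < 0 then nc.set i 0
        else if nc.getD i 0 > 255 then nc.set i 255
        else nc) [x, y, z] [0, 1, 2]
    = [min 255 (max 0 x), min 255 (max 0 y), min 255 (max 0 z)] := by
  simp only [List.foldl_cons, List.foldl_nil]
  split_ifs <;> simp_all [List.set, List.getD] <;> omega

theorem pv_getD0 (a b c : Int) (rest : List Int) : PySem.List.pyGetD (a :: b :: c :: rest) 0 0 = a := by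
  simp [PySem.List.pyGetD, PySem.List.pyGet?, PySem.List.pyIdx?]; rw [if_pos (by omega)]; simp

theorem pv_getD1 (a b c : Int) (rest : List Int) : PySem.List.pyGetD (a :: b :: c :: rest) 1 0 = b := by
  simp [PySem.List.pyGetD, PySem.List.pyGet?, PySem.List.pyIdx?]; rw [if_pos (by omega)]; simp

theorem pv_getD2 (a b c : Int) (rest : List Int) : PySem.List.pyGetD (a :: b :: c :: rest) 2 0 = c := by
  simp [PySem.List.pyGetD, PySem.List.pyGet?, PySem.List.pyIdx?]; rw [if_pos (by omega)]; simp

-- one step of A's candidate construction equals one step of B's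
theorem pv_step_eq (a b c : Int) (rest : List Int) (cn amt : Int) :
    (List.foldl (fun nc i =>
        if nc.getD i 0 < 0 then nc.set i 0
        else if nc.getD i 0 > 255 then nc.set i 255
        else nc)
      (if cn = 0 then [a + amt, b, c]
       else if cn = 1 then [a - amt, b + amt, c]
       else if cn = 2 then [a, b - amt, c + amt]
       else if cn = 3 then [a, b + amt, c]
       else if cn = 4 then [a + amt, b, c]
       else if cn = 5 then [a, b, c - amt]
       else if cn = 6 then [a - amt, b - amt, c - amt]
       else if cn = 7 then [a, b - amt, c + amt]
       else [a - amt, b + amt, c]) [0, 1, 2])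
    = (((a :: b :: c :: rest).zip
          [(if 0 ≤ cn ∧ cn < 8 then (PySem.List.pyGet? pvDeltas cn).getD (-1, 1, 0) else (-1, 1, 0)).1,
           (if 0 ≤ cn ∧ cn < 8 then (PySem.List.pyGet? pvDeltas cn).getD (-1, 1, 0) else (-1, 1, 0)).2.1,
           (if 0 ≤ cn ∧ cn < 8 then (PySem.List.pyGet? pvDeltas cn).getD (-1, 1, 0) else (-1, 1, 0)).2.2]).map
        (fun p => min 255 (max 0 (p.1 + amt * p.2)))) := by
  by_cases h0 : cn = 0
  · subst h0; rw [if_pos rfl, pv_clamp3]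
    simp [pvDeltas, PySem.List.pyGet?, PySem.List.pyIdx?]
  · by_cases h1 : cn = 1
    · subst h1; rw [if_neg h0, if_pos rfl, pv_clamp3]
      simp [pvDeltas, PySem.List.pyGet?, PySem.List.pyIdx?]
      all_goals omega
    · by_cases h2 : cn = 2
      · subst h2; rw [if_neg h0, if_neg h1, if_pos rfl, pv_clamp3]
        simp [pvDeltas, PySem.List.pyGet?, PySem.List.pyIdx?]
        all_goals omega
      · by_cases h3 : cn = 3
        · subst h3; rw [if_neg h0, if_neg h1, if_neg h2, if_pos rfl, pv_clamp3]
          simp [pvDeltas, PySem.List.pyGet?, PySem.List.pyIdx?]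
        · by_cases h4 : cn = 4
          · subst h4; rw [if_neg h0, if_neg h1, if_neg h2, if_neg h3, if_pos rfl, pv_clamp3]
            simp [pvDeltas, PySem.List.pyGet?, PySem.List.pyIdx?]
          · by_cases h5 : cn = 5
            · subst h5; rw [if_neg h0, if_neg h1, if_neg h2, if_neg h3, if_neg h4, if_pos rfl, pv_clamp3]
              simp [pvDeltas, PySem.List.pyGet?, PySem.List.pyIdx?]
              all_goals omega
            · by_cases h6 : cn = 6
              · subst h6; rw [if_neg h0, if_neg h1, if_neg h2, if_neg h3, if_neg h4, if_neg h5, if_pos rfl, pv_clamp3]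
                simp [pvDeltas, PySem.List.pyGet?, PySem.List.pyIdx?]
                all_goals omega
              · by_cases h7 : cn = 7
                · subst h7; rw [if_neg h0, if_neg h1, if_neg h2, if_neg h3, if_neg h4, if_neg h5, if_neg h6, if_pos rfl, pv_clamp3]
                  simp [pvDeltas, PySem.List.pyGet?, PySem.List.pyIdx?]
                  all_goals omega
                · have hg : ¬ (0 ≤ cn ∧ cn < 8) := by omega
                  rw [if_neg h0, if_neg h1, if_neg h2, if_neg h3, if_neg h4, if_neg h5, if_neg h6, if_neg h7, pv_clamp3]
                  simp [hg]
                  all_goals omega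

theorem pv_go_eq : ∀ (fuel : Nat) (color : List Int) (acc : List (List Int)) (cn amt : Int),
    (color ∈ acc → 3 ≤ color.length) →
    mpcu__check_py_go fuel color acc cn amt = mpcu__check_py_alt_go fuel color acc cn amt := by
  intro fuel
  induction fuel with
  | zero => intro color acc cn amt _; rfl
  | succ n ih =>
    intro color acc cn amt hlen
    by_cases hm : color ∈ acc
    · rcases color with _ | ⟨a, color⟩
      · exact absurd (hlen hm) (by norm_num)
      rcases color with _ | ⟨b, color⟩
      · exact absurd (hlen hm) (by norm_num)
      rcases color with _ | ⟨c, rest⟩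
      · exact absurd (hlen hm) (by norm_num)
      simp only [mpcu__check_py_go, mpcu__check_py_alt_go, hm, not_true_eq_false,
        if_false, if_true, pv_getD0, pv_getD1, pv_getD2]
      rw [pv_step_eq a b c rest cn amt]
      apply ih
      intro _
      rcases hd : (if 0 ≤ cn ∧ cn < 8 then (PySem.List.pyGet? pvDeltas cn).getD (-1, 1, 0) else (-1, 1, 0)) with ⟨d1, d2, d3⟩
      simp
    · simp only [mpcu__check_py_go, mpcu__check_py_alt_go, hm, not_false_eq_true,
        if_true, if_false]

-- ===== VERDICT (by name: the statement is the Claim_ definition above) =====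
theorem mpcu__check_py_spec : Claim_equal_mpcu__check_py := by
  intro color acc cn amt _ hpre
  unfold Spec_mpcu__check_py mpcu__check_py mpcu__check_py_alt
  exact pv_go_eq pvFuel color acc cn amt hpre
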